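-- pv_equiv track=rewrite | github.com/DHMorse/wsl | main.py | sortDirsByImportance
-- ===== SOURCE A (Python) =====
-- def sortDirsByImportance(searchTerm: str, dirs: list[str]) -> tuple[list[str], list[str], list[str]]:
--     dirFilenameMatches: list[str] = []
--     dirFilenameContains: list[str] = []
--     dirPathContains: list[str] = []
--
--     for dir in dirs:
--         filename = dir.split('\\')[-1].split('.')[0]
--
--         if filename.lower() == searchTerm.lower():
--             dirFilenameMatches.append(dir)
--
--         elif searchTerm.lower() in filename.lower():
--             dirFilenameContains.append(dir)
--
--         elif searchTerm.lower() in dir.lower():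
--             dirPathContains.append(dir)
--
--     return (dirFilenameMatches, dirFilenameContains, dirPathContains)
-- ===== SOURCE B (Python) =====
-- def sortDirsByImportance(searchTerm: str, dirs: list[str]) -> tuple[list[str], list[str], list[str]]:
--     low = searchTerm.lower()
--
--     def filename(dir: str) -> str:
--         return dir.split('\\')[-1].split('.')[0].lower()
--
--     return ([d for d in dirs if filename(d) == low],
--             [d for d in dirs if filename(d) != low and low in filename(d)],
--             [d for d in dirs if low not in filename(d) and low in d.lower()])
-- ===== Notes on version B (the rewrite author's own statement) =====
-- stated objective: alternative
-- what changed: The single accumulating loop with an if/elif/elif chain is replaced by three independent list comprehensions over dirs with mutually-exclusive predicates on the lowercased filename; searchTerm.lower() is hoisted and computed once instead of up to three times per element.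
import Mathlib
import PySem

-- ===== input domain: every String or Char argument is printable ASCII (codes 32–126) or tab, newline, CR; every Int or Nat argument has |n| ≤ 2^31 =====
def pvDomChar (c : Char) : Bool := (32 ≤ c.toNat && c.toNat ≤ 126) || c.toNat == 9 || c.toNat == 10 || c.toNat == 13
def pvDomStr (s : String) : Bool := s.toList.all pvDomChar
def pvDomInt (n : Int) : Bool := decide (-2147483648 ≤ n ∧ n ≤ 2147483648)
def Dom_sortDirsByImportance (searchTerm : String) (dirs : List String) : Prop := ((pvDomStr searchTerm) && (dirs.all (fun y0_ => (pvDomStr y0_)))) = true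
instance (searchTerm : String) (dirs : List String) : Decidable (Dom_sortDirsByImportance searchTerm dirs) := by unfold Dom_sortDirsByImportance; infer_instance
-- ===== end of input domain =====

-- B restates A's if/elif/elif chain as three independent filters with mutually exclusive predicates (alternative decomposition, same cost).

-- shared helper (identical expression in both Pythons): dir.split('\\')[-1].split('.')[0]
-- [-1] and [0] ported with pyGetD: exact here since str.split with a nonempty separator never returns an empty list
-- Str.split? returns none only for an empty separator, which never occurs here, so .getD [] is exact
def pvFilename (dir : String) : String :=
  PySem.List.pyGetD ((PySem.Str.split? (PySem.List.pyGetD ((PySem.Str.split? dir "\\").getD []) (-1) "") ".").getD []) 0 ""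

-- ===== PORT A =====
def sortDirsByImportance (searchTerm : String) (dirs : List String) : List String × List String × List String :=
  dirs.foldl (fun acc dir =>
    let filename := pvFilename dir
    if PySem.Str.lower filename = PySem.Str.lower searchTerm then
      (acc.1 ++ [dir], acc.2.1, acc.2.2)
    else if PySem.Str.isIn (PySem.Str.lower searchTerm) (PySem.Str.lower filename) then
      (acc.1, acc.2.1 ++ [dir], acc.2.2)
    else if PySem.Str.isIn (PySem.Str.lower searchTerm) (PySem.Str.lower dir) then
      (acc.1, acc.2.1, acc.2.2 ++ [dir])
    else acc) ([], [], [])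

-- ===== PORT B =====
def sortDirsByImportance_alt (searchTerm : String) (dirs : List String) : List String × List String × List String :=
  let low := PySem.Str.lower searchTerm
  let fname := fun d => PySem.Str.lower (pvFilename d)
  (dirs.filter (fun d => fname d == low),
   dirs.filter (fun d => fname d != low && PySem.Str.isIn low (fname d)),
   dirs.filter (fun d => !PySem.Str.isIn low (fname d) && PySem.Str.isIn low (PySem.Str.lower d)))

-- ===== PRECONDITION & SPEC =====
def Spec_sortDirsByImportance (searchTerm : String) (dirs : List String) (out : List String × List String × List String) : Prop := out = sortDirsByImportance_alt searchTerm dirs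
instance (searchTerm : String) (dirs : List String) (out : List String × List String × List String) : Decidable (Spec_sortDirsByImportance searchTerm dirs out) := by unfold Spec_sortDirsByImportance; infer_instance

-- ===== CLAIM (what is proved, stated in full; the proofs are below) =====
def Claim_equal_sortDirsByImportance : Prop := ∀ (searchTerm : String) (dirs : List String), Dom_sortDirsByImportance searchTerm dirs → Spec_sortDirsByImportance searchTerm dirs (sortDirsByImportance searchTerm dirs)

-- ===== LEMMAS AND PROOFS =====

-- a string contains itself (used: the 'elif' guards subsume the 'if' guard)
theorem pv_isIn_self (s : List Char) : PySem.Chars.isIn s s = true := by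
  simp [PySem.Chars.isIn_iff_infix]

-- loop invariant: A's fold starting from (m, c, p) appends B's three filters
theorem pv_fold_eq (searchTerm : String) (dirs : List String) (m c p : List String) :
    dirs.foldl (fun acc dir =>
      let filename := pvFilename dir
      if PySem.Str.lower filename = PySem.Str.lower searchTerm then
        (acc.1 ++ [dir], acc.2.1, acc.2.2)
      else if PySem.Str.isIn (PySem.Str.lower searchTerm) (PySem.Str.lower filename) then
        (acc.1, acc.2.1 ++ [dir], acc.2.2)
      else if PySem.Str.isIn (PySem.Str.lower searchTerm) (PySem.Str.lower dir) then
        (acc.1, acc.2.1, acc.2.2 ++ [dir])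
      else acc) (m, c, p) =
    (m ++ dirs.filter (fun d => PySem.Str.lower (pvFilename d) == PySem.Str.lower searchTerm),
     c ++ dirs.filter (fun d => PySem.Str.lower (pvFilename d) != PySem.Str.lower searchTerm &&
            PySem.Str.isIn (PySem.Str.lower searchTerm) (PySem.Str.lower (pvFilename d))),
     p ++ dirs.filter (fun d => !PySem.Str.isIn (PySem.Str.lower searchTerm) (PySem.Str.lower (pvFilename d)) &&
            PySem.Str.isIn (PySem.Str.lower searchTerm) (PySem.Str.lower d))) := by
  induction dirs generalizing m c p with
  | nil => simp
  | cons d ds ih =>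
    simp only [List.foldl_cons, List.filter_cons]
    simp at ih
    by_cases h1 : PySem.Str.lower (pvFilename d) = PySem.Str.lower searchTerm
    · simp [h1, pv_isIn_self, ih]
    · by_cases h2 : PySem.Chars.isIn (PySem.Chars.lower searchTerm.toList) (PySem.Chars.lower (pvFilename d).toList) = true
      · simp [h1, h2, ih, bne_iff_ne]
      · by_cases h3 : PySem.Chars.isIn (PySem.Chars.lower searchTerm.toList) (PySem.Chars.lower d.toList) = true
        · simp [h1, h2, h3, ih]
        · simp [h1, h2, h3, ih]

-- ===== VERDICT (by name: the statement is the Claim_ definition above) =====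
theorem sortDirsByImportance_spec : Claim_equal_sortDirsByImportance := by
  intro searchTerm dirs _
  show sortDirsByImportance searchTerm dirs = sortDirsByImportance_alt searchTerm dirs
  simp only [sortDirsByImportance, sortDirsByImportance_alt]
  simpa using pv_fold_eq searchTerm dirs [] [] []
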